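-- pv_equiv track=rewrite | github.com/rustyrohbot/dsa-review | problems/top-n-viewed-k-sequences.py | get_top_n_k_sequences
-- ===== SOURCE A (Python) =====
-- from typing import List, Tuple, Any, Dict
-- import collections
--
-- ItemType = Any
--
-- Sequence = Tuple[ItemType, ...] # K-sequences will be tuples to be hashable
--
-- def get_top_n_k_sequences(
--     user_sessions: List[List[ItemType]], k: int, n: int
-- ) -> List[Tuple[Sequence, int]]:
--     """
--     Finds the top N most frequent K-length sequences from user sessions.
--     """
--     if not user_sessions or k <= 0 or n <= 0:
--         return []
--
--     sequence_counts: Dict[Sequence, int] = collections.Counter()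
--
--     for session in user_sessions:
--         if len(session) < k:
--             continue
--         for i in range(len(session) - k + 1):
--             # Extract K-sequence and convert to tuple to be hashable
--             k_sequence = tuple(session[i : i + k])
--             sequence_counts[k_sequence] += 1
--
--     if not sequence_counts:
--         return []
--
--     # Use a min-heap to find the top N elements efficiently
--     # The heap will store (frequency, sequence) to sort by frequency
--     # Python's heapq is a min-heap, so for top N largest, we can:
--     # 1. Push all items and then use nlargest.
--     # 2. Maintain a heap of size N: if new item > heap_min, pop and push.
--
--     # Option 1: Using heapq.nlargest (simpler to write)
--     # We need to sort by frequency (value) then by sequence (key) for deterministic tie-breaking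
--     # nlargest takes an iterable and a key for comparison.
--     # To handle ties by sequence lexicographically for consistent test results:
--     # We can store (-frequency, sequence) in a min-heap to simulate a max-heap by frequency,
--     # then sort sequences lexicographically for ties.
--     # Or, get all items, sort them, then take top N.
--
--     # Let's use a more direct approach for clarity with sorting for ties:
--     # Convert Counter items to a list of (sequence, frequency)
--     all_sequences_with_counts = list(sequence_counts.items())
--
--     # Sort: Primary key is frequency (descending), secondary key is sequence (ascending for ties)
--     # Python's sort is stable, so we can sort multiple times or use a tuple in lambda.
--     # Sorting by (-frequency, sequence_tuple)
--     all_sequences_with_counts.sort(key=lambda x: (-x[1], x[0]))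
--
--     return all_sequences_with_counts[:n]
-- ===== SOURCE B (Python) =====
-- def get_top_n_k_sequences(user_sessions, k, n):
--     if not user_sessions or k <= 0 or n <= 0:
--         return []
--
--     # Sort-based counting: no dict/Counter. Collect every k-window, sort them,
--     # run-length-encode the sorted list into (sequence, count) runs.
--     windows = []
--     for session in user_sessions:
--         for i in range(len(session) - k + 1):
--             windows.append(tuple(session[i : i + k]))
--     windows.sort()
--
--     runs = []
--     for w in windows:
--         if runs and runs[-1][0] == w:
--             runs[-1] = (w, runs[-1][1] + 1)
--         else:
--             runs.append((w, 1))
--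
--     # runs is lexicographically ascending; a STABLE sort by descending count
--     # therefore yields exactly the (-count, sequence) order without a compound key.
--     runs.sort(key=lambda r: -r[1])
--     return runs[:n]
-- ===== Notes on version B (the rewrite author's own statement) =====
-- stated objective: alternative
-- what changed: Replaces the Counter dictionary and the compound-key (-freq, seq) sort entirely: B collects all k-windows into one list, sorts it, run-length-encodes the sorted list into (sequence, count) runs, and ranks with a single stable sort by descending count, whose stability over the lex-ascending runs reproduces A's tie-break.
import Mathlib
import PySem

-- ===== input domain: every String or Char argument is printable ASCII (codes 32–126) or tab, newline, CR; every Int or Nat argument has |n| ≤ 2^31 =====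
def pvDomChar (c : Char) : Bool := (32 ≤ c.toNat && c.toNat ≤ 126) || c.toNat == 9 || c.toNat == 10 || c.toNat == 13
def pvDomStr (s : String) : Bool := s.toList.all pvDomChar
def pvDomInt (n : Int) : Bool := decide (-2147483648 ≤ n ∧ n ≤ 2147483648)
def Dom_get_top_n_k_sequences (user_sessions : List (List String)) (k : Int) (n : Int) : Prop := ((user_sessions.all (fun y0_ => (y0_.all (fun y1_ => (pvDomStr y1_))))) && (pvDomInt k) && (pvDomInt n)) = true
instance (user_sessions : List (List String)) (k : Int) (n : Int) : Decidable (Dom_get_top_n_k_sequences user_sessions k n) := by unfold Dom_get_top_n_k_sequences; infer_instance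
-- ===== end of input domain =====

-- B drops the Counter dictionary and the compound-key (-freq, seq) sort: it sorts the list of
-- all k-windows, run-length-encodes the sorted list into (sequence, count) runs, and ranks with
-- one stable sort by descending count; same return value, a sort-based counting alternative.

-- ===== PORT A =====
def get_top_n_k_sequences (user_sessions : List (List String)) (k : Int) (n : Int) : List (List String × Int) :=
  if user_sessions = [] ∨ k ≤ 0 ∨ n ≤ 0 then []
  else
    -- Counter loop: sequence_counts[k_sequence] += 1  (getitem with default 0, then setitem)
    let sequence_counts : PySem.Dict (List String) Int :=
      user_sessions.foldl (fun d session =>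
        if (session.length : Int) < k then d
        else (PySem.List.pyRange 0 ((session.length : Int) - k + 1)).foldl
          (fun d i =>
            d.insert (PySem.List.slice session (some i) (some (i + k)))
              (d.getD (PySem.List.slice session (some i) (some (i + k))) 0 + 1)) d)
        PySem.Dict.empty
    if sequence_counts.items = [] then []
    else
      -- all_sequences_with_counts.sort(key=lambda x: (-x[1], x[0]))
      let all_sequences_with_counts :=
        PySem.List.sorted2 sequence_counts.items (fun x => -x.2) (fun x => x.1)
      PySem.List.slice all_sequences_with_counts none (some n)

-- ===== PORT B =====
def get_top_n_k_sequences_alt (user_sessions : List (List String)) (k : Int) (n : Int) : List (List String × Int) :=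
  if user_sessions = [] ∨ k ≤ 0 ∨ n ≤ 0 then []
  else
    -- windows.append(tuple(session[i:i+k]))
    let windows : List (List String) :=
      user_sessions.foldl (fun acc session =>
        (PySem.List.pyRange 0 ((session.length : Int) - k + 1)).foldl
          (fun acc i => acc ++ [PySem.List.slice session (some i) (some (i + k))]) acc) []
    -- windows.sort()
    let sws := PySem.List.sorted windows (fun w => w) false
    -- run-length encode: runs[-1] read is getLast?, 'runs[-1] = p' is dropLast ++ [p] (runs ≠ [] there)
    let runs : List (List String × Int) :=
      sws.foldl (fun runs w =>
        match runs.getLast? with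
        | some last => if last.1 == w then runs.dropLast ++ [(w, last.2 + 1)] else runs ++ [(w, 1)]
        | none => runs ++ [(w, 1)]) []
    -- runs.sort(key=lambda r: -r[1])  (stable)
    PySem.List.slice (PySem.List.sorted runs (fun r => -r.2) false) none (some n)

-- ===== PRECONDITION & SPEC =====
def Spec_get_top_n_k_sequences (user_sessions : List (List String)) (k : Int) (n : Int) (out : List (List String × Int)) : Prop := out = get_top_n_k_sequences_alt user_sessions k n
instance (user_sessions : List (List String)) (k : Int) (n : Int) (out : List (List String × Int)) : Decidable (Spec_get_top_n_k_sequences user_sessions k n out) := by unfold Spec_get_top_n_k_sequences; infer_instance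

-- ===== CLAIM (what is proved, stated in full; the proofs are below) =====
def Claim_equal_get_top_n_k_sequences : Prop := ∀ (user_sessions : List (List String)) (k : Int) (n : Int), Dom_get_top_n_k_sequences user_sessions k n → Spec_get_top_n_k_sequences user_sessions k n (get_top_n_k_sequences user_sessions k n)

-- ===== LEMMAS AND PROOFS =====

-- A's sort key lambda x: (-x[1], x[0]) is the lexicographic order on (-freq, seq).
theorem pv_sorted2_eq_sorted_lex (xs : List (List String × Int)) :
    PySem.List.sorted2 xs (fun x => -x.2) (fun x => x.1) =
    PySem.List.sorted xs (fun x => (toLex (-x.2, x.1) : Lex (Int × List String))) := by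
  have hbf : (fun (a b : List String × Int) => decide (-a.2 < -b.2) || (!decide (-b.2 < -a.2) && decide (a.1 < b.1)))
      = fun a b => decide ((toLex (-a.2, a.1) : Lex (Int × List String)) < toLex (-b.2, b.1)) := by
    funext a b
    rw [Bool.eq_iff_iff]
    simp only [Bool.or_eq_true, Bool.and_eq_true, Bool.not_eq_true', decide_eq_true_eq,
      decide_eq_false_iff_not, Prod.Lex.lt_iff, ofLex_toLex]
    by_cases h : (-a.2 : Int) < -b.2
    · simp [h]
    · simp only [h, false_or]
      exact ⟨fun ⟨u, p⟩ => ⟨by omega, p⟩, fun ⟨u, p⟩ => ⟨by omega, p⟩⟩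
  unfold PySem.List.sorted2 PySem.List.sorted
  simp only [Bool.false_eq_true, if_false, hbf]

-- A's 'if len(session) < k: continue' guard is redundant: the window range is empty then.
theorem pv_counts_eq (user_sessions : List (List String)) (k : Int)
    (d : PySem.Dict (List String) Int) :
    user_sessions.foldl (fun d session =>
        if (session.length : Int) < k then d
        else (PySem.List.pyRange 0 ((session.length : Int) - k + 1)).foldl
          (fun d i =>
            d.insert (PySem.List.slice session (some i) (some (i + k)))
              (d.getD (PySem.List.slice session (some i) (some (i + k))) 0 + 1)) d) d
    = user_sessions.foldl (fun d session =>
        (PySem.List.pyRange 0 ((session.length : Int) - k + 1)).foldl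
          (fun d i =>
            d.insert (PySem.List.slice session (some i) (some (i + k)))
              (d.getD (PySem.List.slice session (some i) (some (i + k))) 0 + 1)) d) d := by
  apply PySem.List.foldl_congr_mem
  intro acc session _
  split_ifs with h
  · have h0 : ((session.length : Int) - k + 1 - 0).toNat = 0 := by omega
    rw [PySem.List.pyRange_one, h0]
    rfl
  · rfl

-- an insertion is insensitive to the comparison outside the current accumulator
theorem pv_insertBy_congr {α : Type} (b1 b2 : α → α → Bool) (x : α) (ys : List α)
    (h : ∀ y ∈ ys, b1 x y = b2 x y) :
    PySem.List.insertBy b1 x ys = PySem.List.insertBy b2 x ys := by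
  induction ys with
  | nil => rfl
  | cons y t ih =>
    have e1 : PySem.List.insertBy b1 x (y :: t)
        = if b1 x y then x :: y :: t else y :: PySem.List.insertBy b1 x t := rfl
    have e2 : PySem.List.insertBy b2 x (y :: t)
        = if b2 x y then x :: y :: t else y :: PySem.List.insertBy b2 x t := rfl
    rw [e1, e2, h y (by simp)]
    by_cases hb : b2 x y = true
    · simp [hb]
    · simp only [Bool.not_eq_true] at hb
      simp only [hb, Bool.false_eq_true, if_false]
      rw [ih (fun z hz => h z (by simp [hz]))]

-- STABILITY: on a list strictly increasing in the secondary key, the stable sort by the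
-- primary key alone equals the sort by the (primary, secondary) compound key.
theorem pv_stable_fold (key : List String × Int → Int) (sec : List String × Int → List String)
    (xs acc : List (List String × Int))
    (hacc : ∀ x ∈ xs, ∀ y ∈ acc, sec y < sec x)
    (hp : xs.Pairwise (fun a b => sec a < sec b)) :
    xs.foldl (fun a x => PySem.List.insertBy (fun a b => decide (key a < key b)) x a) acc
    = xs.foldl (fun a x => PySem.List.insertBy
        (fun a b => decide (key a < key b) || (!decide (key b < key a) && decide (sec a < sec b))) x a) acc := by
  induction xs generalizing acc with
  | nil => rfl
  | cons x t ih =>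
    simp only [List.foldl_cons]
    have hstep : PySem.List.insertBy (fun a b => decide (key a < key b)) x acc
        = PySem.List.insertBy
            (fun a b => decide (key a < key b) || (!decide (key b < key a) && decide (sec a < sec b))) x acc := by
      apply pv_insertBy_congr
      intro y hy
      have hlt : sec y < sec x := hacc x (by simp) y hy
      have : decide (sec x < sec y) = false := by
        simp only [decide_eq_false_iff_not]
        exact not_lt_of_gt hlt
      simp [this]
    rw [hstep]
    apply ih
    · intro x' hx' y hy
      rcases (PySem.List.mem_insertBy _ _ _ _).mp hy with rfl | hy'
      · exact (List.pairwise_cons.mp hp).1 x' hx'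
      · exact hacc x' (by simp [hx']) y hy'
    · exact (List.pairwise_cons.mp hp).2

theorem pv_stable (xs : List (List String × Int))
    (hp : xs.Pairwise (fun a b => a.1 < b.1)) :
    PySem.List.sorted xs (fun r => -r.2) false
    = PySem.List.sorted2 xs (fun r => -r.2) (fun r => r.1) := by
  unfold PySem.List.sorted PySem.List.sorted2
  simp only [Bool.false_eq_true, if_false]
  exact pv_stable_fold (fun r => -r.2) (fun r => r.1) xs [] (by simp) hp

-- run-length encoding of a sorted list, recursively
def pvRle (w0 : List String) (c : Int) : List (List String) → List (List String × Int)
  | [] => [(w0, c)]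
  | w :: t => if w0 = w then pvRle w0 (c + 1) t else (w0, c) :: pvRle w 1 t

-- B's run loop IS pvRle
theorem pv_fold_rle (ws : List (List String)) (res : List (List String × Int))
    (w0 : List String) (c : Int) :
    ws.foldl (fun runs w =>
        match runs.getLast? with
        | some last => if last.1 == w then runs.dropLast ++ [(w, last.2 + 1)] else runs ++ [(w, 1)]
        | none => runs ++ [(w, 1)]) (res ++ [(w0, c)])
    = res ++ pvRle w0 c ws := by
  induction ws generalizing res w0 c with
  | nil => simp [pvRle]
  | cons w t ih =>
    simp only [List.foldl_cons, List.getLast?_concat, List.dropLast_concat]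
    by_cases h : w0 = w
    · subst h
      simp only [beq_self_eq_true, if_true, pvRle, ih]
    · have hb : (w0 == w) = false := by simpa using h
      simp only [hb, Bool.false_eq_true, if_false, pvRle, if_neg h]
      rw [ih (res ++ [(w0, c)]) w 1]
      simp
  
-- membership in the run-length encoding of a sorted list: a run per distinct value, with its count
theorem pv_rle_mem (ws : List (List String)) (w0 : List String) (c : Int)
    (hub : ∀ x ∈ ws, w0 ≤ x) (hp : ws.Pairwise (fun a b => a ≤ b)) (p : List String × Int) :
    p ∈ pvRle w0 c ws ↔
      (p.1 = w0 ∧ p.2 = c + (ws.count w0 : Int)) ∨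
      (p.1 ∈ ws ∧ p.1 ≠ w0 ∧ p.2 = (ws.count p.1 : Int)) := by
  induction ws generalizing w0 c with
  | nil =>
    simp only [pvRle, List.mem_singleton, List.count_nil, List.not_mem_nil, false_and, or_false,
      Nat.cast_zero, add_zero, Prod.ext_iff]
  | cons w t ih =>
    rcases List.pairwise_cons.mp hp with ⟨hwt, hpt⟩
    by_cases h : w0 = w
    · subst h
      rw [pvRle, if_pos rfl, ih w0 (c + 1) hwt hpt]
      constructor
      · rintro (⟨h1, h2⟩ | ⟨h1, h2, h3⟩)
        · exact Or.inl ⟨h1, by rw [h2]; simp; ring⟩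
        · exact Or.inr ⟨List.mem_cons_of_mem _ h1, h2, by rw [h3]; simp [Ne.symm h2]⟩
      · rintro (⟨h1, h2⟩ | ⟨h1, h2, h3⟩)
        · exact Or.inl ⟨h1, by rw [h2]; simp; ring⟩
        · refine Or.inr ⟨?_, h2, by rw [h3]; simp [Ne.symm h2]⟩
          rcases List.mem_cons.mp h1 with h4 | h4
          · exact absurd h4 h2
          · exact h4
    · have hw0w : w0 < w := lt_of_le_of_ne (hub w (List.mem_cons_self)) h
      have hnot : w0 ∉ w :: t := by
        intro hmem
        rcases List.mem_cons.mp hmem with h4 | h4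
        · exact h h4
        · exact absurd rfl (ne_of_lt (lt_of_lt_of_le hw0w (hwt _ h4)))
      have hub' : ∀ x ∈ t, w ≤ x := hwt
      rw [pvRle, if_neg h]
      constructor
      · intro hmem
        rcases List.mem_cons.mp hmem with h4 | h4
        · refine Or.inl ⟨congrArg Prod.fst h4, ?_⟩
          rw [List.count_eq_zero_of_not_mem hnot]
          simp [Prod.ext_iff] at h4
          simp [h4.2]
        · rcases (ih w 1 hub' hpt).mp h4 with ⟨h1, h2⟩ | ⟨h1, h2, h3⟩
          · refine Or.inr ⟨by rw [h1]; exact List.mem_cons_self, by rw [h1]; exact (ne_of_lt hw0w).symm, ?_⟩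
            rw [h2, h1]
            simp
            ring
          · have hne0 : p.1 ≠ w0 := by
              intro heq
              exact absurd heq.symm (ne_of_lt (lt_of_lt_of_le hw0w (hub' _ h1)))
            exact Or.inr ⟨List.mem_cons_of_mem _ h1, hne0, by rw [h3]; simp [Ne.symm h2]⟩
      · rintro (⟨h1, h2⟩ | ⟨h1, h2, h3⟩)
        · have : p = (w0, c) := by
            rw [List.count_eq_zero_of_not_mem hnot] at h2
            simp at h2
            exact Prod.ext h1 h2
          rw [this]; exact List.mem_cons_self
        · rcases List.mem_cons.mp h1 with h4 | h4
          · refine List.mem_cons_of_mem _ ((ih w 1 hub' hpt).mpr (Or.inl ⟨h4, ?_⟩))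
            rw [h3, h4]
            simp
            ring
          · by_cases h5 : p.1 = w
            · refine List.mem_cons_of_mem _ ((ih w 1 hub' hpt).mpr (Or.inl ⟨h5, ?_⟩))
              rw [h3, h5]
              simp
              ring
            · exact List.mem_cons_of_mem _ ((ih w 1 hub' hpt).mpr
                (Or.inr ⟨h4, h5, by rw [h3]; simp [Ne.symm h5]⟩))

-- keys of the run-length encoding are strictly increasing (and bounded below by w0)
theorem pv_rle_keys (ws : List (List String)) (w0 : List String) (c : Int)
    (hub : ∀ x ∈ ws, w0 ≤ x) (hp : ws.Pairwise (fun a b => a ≤ b)) :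
    (pvRle w0 c ws).Pairwise (fun a b => a.1 < b.1) ∧ ∀ p ∈ pvRle w0 c ws, w0 ≤ p.1 := by
  induction ws generalizing w0 c with
  | nil => simp [pvRle]
  | cons w t ih =>
    rcases List.pairwise_cons.mp hp with ⟨hwt, hpt⟩
    by_cases h : w0 = w
    · subst h
      rw [pvRle, if_pos rfl]
      exact ih w0 (c + 1) hwt hpt
    · have hw0w : w0 < w := lt_of_le_of_ne (hub w (List.mem_cons_self)) h
      obtain ⟨ih1, ih2⟩ := ih w 1 hwt hpt
      rw [pvRle, if_neg h]
      refine ⟨List.pairwise_cons.mpr ⟨?_, ih1⟩, ?_⟩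
      · intro q hq
        exact lt_of_lt_of_le hw0w (ih2 q hq)
      · intro q hq
        rcases List.mem_cons.mp hq with h4 | h4
        · rw [h4]
        · exact le_of_lt (lt_of_lt_of_le hw0w (ih2 q h4))

-- a fold over a flattened list is the nested fold
theorem pv_foldl_flatMap {α β γ : Type} (l : List α) (g : α → List β) (f : γ → β → γ) (init : γ) :
    (l.flatMap g).foldl f init = l.foldl (fun acc x => (g x).foldl f acc) init := by
  induction l generalizing init with
  | nil => rfl
  | cons x t ih => simp only [List.flatMap_cons, List.foldl_append, List.foldl_cons, ih]

-- the sort is insensitive to the (propositionally equal) order instance route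
theorem pv_sorted_inst {α κ : Type} (i1 i2 : LT κ) (d1 : @DecidableLT κ i1) (d2 : @DecidableLT κ i2)
    (h : ∀ a b : κ, @LT.lt κ i1 a b ↔ @LT.lt κ i2 a b)
    (xs : List α) (key : α → κ) (rev : Bool) :
    @PySem.List.sorted α κ i1 d1 xs key rev = @PySem.List.sorted α κ i2 d2 xs key rev := by
  have hb : (fun (a b : α) => @decide (@LT.lt κ i1 (key a) (key b)) (d1 (key a) (key b)))
      = (fun a b => @decide (@LT.lt κ i2 (key a) (key b)) (d2 (key a) (key b))) := by
    funext a b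
    rw [decide_eq_decide]
    exact h _ _
  have hb2 : (fun (a b : α) => @decide (@LT.lt κ i1 (key b) (key a)) (d1 (key b) (key a)))
      = (fun a b => @decide (@LT.lt κ i2 (key b) (key a)) (d2 (key b) (key a))) := by
    funext a b
    rw [decide_eq_decide]
    exact h _ _
  unfold PySem.List.sorted
  cases rev
  · simp only [Bool.false_eq_true, if_false, hb]
  · simp only [if_true, hb2]

-- the lexicographic key (-freq, seq) determines the pair
theorem pv_lexkey_inj : Function.Injective
    (fun x : List String × Int => (toLex (-x.2, x.1) : Lex (Int × List String))) := by
  intro a b hab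
  have h := congrArg ofLex hab
  simp only [ofLex_toLex, Prod.ext_iff] at h
  exact Prod.ext h.2 (by omega)

theorem get_top_n_k_sequences_spec_aux (user_sessions : List (List String)) (k : Int) (n : Int) :
    get_top_n_k_sequences user_sessions k n = get_top_n_k_sequences_alt user_sessions k n := by
  unfold get_top_n_k_sequences get_top_n_k_sequences_alt
  by_cases hg : user_sessions = [] ∨ k ≤ 0 ∨ n ≤ 0
  · rw [if_pos hg, if_pos hg]
  · rw [if_neg hg, if_neg hg]
    show (if ((user_sessions.foldl (fun d session =>
          if (session.length : Int) < k then d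
          else (PySem.List.pyRange 0 ((session.length : Int) - k + 1)).foldl
            (fun d i =>
              d.insert (PySem.List.slice session (some i) (some (i + k)))
                (d.getD (PySem.List.slice session (some i) (some (i + k))) 0 + 1)) d)
          (PySem.Dict.empty : PySem.Dict (List String) Int)).items = []) then []
        else PySem.List.slice
          (PySem.List.sorted2 ((user_sessions.foldl (fun d session =>
            if (session.length : Int) < k then d
            else (PySem.List.pyRange 0 ((session.length : Int) - k + 1)).foldl
              (fun d i =>
                d.insert (PySem.List.slice session (some i) (some (i + k)))
                  (d.getD (PySem.List.slice session (some i) (some (i + k))) 0 + 1)) d)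
            (PySem.Dict.empty : PySem.Dict (List String) Int)).items) (fun x => -x.2) (fun x => x.1)) none (some n))
      = PySem.List.slice
          (PySem.List.sorted
            ((PySem.List.sorted (user_sessions.foldl (fun acc session =>
                (PySem.List.pyRange 0 ((session.length : Int) - k + 1)).foldl
                  (fun acc i => acc ++ [PySem.List.slice session (some i) (some (i + k))]) acc) [])
              (fun w => w) false).foldl (fun runs w =>
                match runs.getLast? with
                | some last => if last.1 == w then runs.dropLast ++ [(w, last.2 + 1)] else runs ++ [(w, 1)]
                | none => runs ++ [(w, 1)])
              [])
            (fun r => -r.2) false) none (some n)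
    rw [pv_counts_eq]
    set W : List (List String) := user_sessions.flatMap (fun s =>
      (PySem.List.pyRange 0 ((s.length : Int) - k + 1)).map
        (fun i => PySem.List.slice s (some i) (some (i + k)))) with hWdef
    -- B's window-building loop builds W
    have hwin : user_sessions.foldl (fun acc session =>
        (PySem.List.pyRange 0 ((session.length : Int) - k + 1)).foldl
          (fun acc i => acc ++ [PySem.List.slice session (some i) (some (i + k))]) acc) []
        = W := by
      rw [PySem.List.foldl_congr_mem user_sessions _
          (fun acc session => acc ++
            (PySem.List.pyRange 0 ((session.length : Int) - k + 1)).map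
              (fun i => PySem.List.slice session (some i) (some (i + k)))) []
          (fun acc session _ => PySem.List.foldl_append_singleton_eq_map _ _ _)]
      rw [PySem.List.foldl_append_eq_flatMap, List.nil_append]
    -- A's counting loop builds Counter(W)
    have hdict : user_sessions.foldl (fun d session =>
        (PySem.List.pyRange 0 ((session.length : Int) - k + 1)).foldl
          (fun d i =>
            d.insert (PySem.List.slice session (some i) (some (i + k)))
              (d.getD (PySem.List.slice session (some i) (some (i + k))) 0 + 1)) d)
        (PySem.Dict.empty : PySem.Dict (List String) Int)
        = PySem.Dict.counter W := by
      rw [← PySem.Dict.foldl_insert_getD_add_one_eq_counter, hWdef, pv_foldl_flatMap]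
      exact PySem.List.foldl_congr_mem user_sessions _ _ _
        (fun acc session _ => (List.foldl_map
          (f := fun i => PySem.List.slice session (some i) (some (i + k)))
          (g := fun (d : PySem.Dict (List String) Int) (x : List String) => d.insert x (d.getD x 0 + 1))).symm)
    rw [hdict, hwin, PySem.Dict.items_counter]
    by_cases hWnil : W = []
    · rw [hWnil]
      simp [PySem.Set.ofList, PySem.List.sorted, PySem.List.slice]
    · have hne : (PySem.Set.ofList W).map (fun s => (s, (W.count s : Int))) ≠ [] := by
        intro hmap
        rcases List.exists_mem_of_ne_nil W hWnil with ⟨x, hx⟩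
        have : x ∈ PySem.Set.ofList W := (PySem.Set.mem_ofList W x).mpr hx
        rw [List.map_eq_nil_iff.mp hmap] at this
        exact absurd this (List.not_mem_nil)
      rw [if_neg hne]
      -- align the order-instance route of the window sort with the LinearOrder one
      rw [pv_sorted_inst (@List.instLT String String.LT') List.instLinearOrder.toLT
        (fun a b => @List.decidableLT String instDecidableEqString String.LT' String.decidableLT' a b)
        LinearOrder.toDecidableLT (fun a b => Iff.rfl) W (fun w => w) false]
      -- name the sorted window list and decompose it
      set sws := @PySem.List.sorted (List String) (List String) List.instLinearOrder.toLT
        LinearOrder.toDecidableLT W (fun w => w) false with hswsdef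
      have hsws_perm : sws.Perm W := @PySem.List.sorted_perm (List String) (List String) List.instLinearOrder.toLT LinearOrder.toDecidableLT W (fun w => w) false
      have hsws_pair : sws.Pairwise (fun a b => a ≤ b) :=
        PySem.List.sorted_pairwise (κ := List String) W (fun w => w)
      cases hsws : sws with
      | nil =>
        exact absurd ((@PySem.List.sorted_eq_nil_iff (List String) (List String) List.instLinearOrder.toLT LinearOrder.toDecidableLT W (fun w => w) false).mp (hswsdef ▸ hsws)) hWnil
      | cons w t =>
        rw [hsws] at hsws_pair hsws_perm
        rcases List.pairwise_cons.mp hsws_pair with ⟨hub, hpt⟩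
        -- B's run loop is pvRle w 1 t
        have hruns : (w :: t).foldl (fun runs w =>
            match runs.getLast? with
            | some last => if last.1 == w then runs.dropLast ++ [(w, last.2 + 1)] else runs ++ [(w, 1)]
            | none => runs ++ [(w, 1)]) ([] : List (List String × Int))
            = pvRle w 1 t := by
          rw [List.foldl_cons]
          have hstep : (match ([] : List (List String × Int)).getLast? with
              | some last => if last.1 == w then ([] : List (List String × Int)).dropLast ++ [(w, last.2 + 1)] else [] ++ [(w, 1)]
              | none => ([] : List (List String × Int)) ++ [(w, 1)]) = ([] : List (List String × Int)) ++ [(w, 1)] := rfl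
          rw [hstep, pv_fold_rle, List.nil_append]
        -- runs facts
        have hkeys := pv_rle_keys t w 1 hub hpt
        have hmem := pv_rle_mem t w 1 hub hpt
        have hcountW : ∀ a : List String, W.count a = (w :: t).count a :=
          fun a => (hsws_perm.count_eq a).symm
        have hmemW : ∀ a : List String, a ∈ W ↔ a ∈ w :: t := fun a => (hsws_perm.mem_iff).symm
        -- the runs are exactly Counter(W).items, up to order
        have hperm : (pvRle w 1 t).Perm
            ((PySem.Set.ofList W).map (fun s => (s, (W.count s : Int)))) := by
          apply List.perm_of_nodup_nodup_toFinset_eq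
          · exact hkeys.1.imp (fun hlt heq => absurd (congrArg Prod.fst heq) (ne_of_lt hlt))
          · exact (PySem.Set.nodup_ofList W).map
              (fun a b hab => congrArg Prod.fst hab)
          · apply Finset.ext
            intro p
            rw [List.mem_toFinset, List.mem_toFinset, hmem p, List.mem_map]
            constructor
            · rintro (⟨h1, h2⟩ | ⟨h1, h2, h3⟩)
              · refine ⟨p.1, (PySem.Set.mem_ofList W p.1).mpr ((hmemW p.1).mpr (by rw [h1]; exact List.mem_cons_self)), ?_⟩
                rw [Prod.ext_iff]
                refine ⟨rfl, ?_⟩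
                rw [hcountW, h1, h2]
                simp
                ring
              · refine ⟨p.1, (PySem.Set.mem_ofList W p.1).mpr ((hmemW p.1).mpr (List.mem_cons_of_mem _ h1)), ?_⟩
                rw [Prod.ext_iff]
                refine ⟨rfl, ?_⟩
                rw [hcountW, h3]
                simp [Ne.symm h2]
            · rintro ⟨s, hs, hsp⟩
              have hsW : s ∈ w :: t := (hmemW s).mp ((PySem.Set.mem_ofList W s).mp hs)
              have hp1 : p.1 = s := (congrArg Prod.fst hsp).symm
              have hp2 : p.2 = (W.count s : Int) := (congrArg Prod.snd hsp).symm
              by_cases h5 : s = w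
              · refine Or.inl ⟨by rw [hp1, h5], ?_⟩
                rw [hp2, hcountW, h5]
                simp
                ring
              · have hst : s ∈ t := by
                  rcases List.mem_cons.mp hsW with h6 | h6
                  · exact absurd h6 h5
                  · exact h6
                refine Or.inr ⟨by rw [hp1]; exact hst, by rw [hp1]; exact h5, ?_⟩
                rw [hp2, hp1, hcountW]
                simp [Ne.symm h5]
        -- ranking: stable sort by -count = compound-key sort = A's sort of the items
        rw [hruns]
        have h1 := pv_stable (pvRle w 1 t) hkeys.1
        have h2 := pv_sorted2_eq_sorted_lex (pvRle w 1 t)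
        have h3 := PySem.List.sorted_eq_sorted_of_perm (pvRle w 1 t)
          ((PySem.Set.ofList W).map (fun s => (s, (W.count s : Int))))
          (fun x : List String × Int => (toLex (-x.2, x.1) : Lex (Int × List String)))
          pv_lexkey_inj hperm
        have h4 := pv_sorted2_eq_sorted_lex ((PySem.Set.ofList W).map (fun s => (s, (W.count s : Int))))
        rw [h4, ← h3, ← h2, ← h1]

-- ===== VERDICT (by name: the statement is the Claim_ definition above) =====
theorem get_top_n_k_sequences_spec : Claim_equal_get_top_n_k_sequences := by
  intro user_sessions k n _
  unfold Spec_get_top_n_k_sequences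
  exact get_top_n_k_sequences_spec_aux user_sessions k n
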